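-- pv_equiv track=rewrite | github.com/AP-MI-2021/lab-4-raresmaier234 | main.py | prelucrareTuplu
-- ===== SOURCE A (Python) =====
-- def prelucrareTuplu(l):
--     """
--     Functia va returna in lista rez, un tuplu, conform cerintei. Mai intai se va retine in vectorul
--     de frecventa cnt = {} nr de aparitii in lista a fiecarui element. Variabila intreaga 'index' va afisa pozitia fiecarui element.
--     param l: reprezinta lista citita de utilizator
--     return: se va returna lista ceruta
--     """
--     rez = []
--     cnt = {}
--     for x in l:
--         cnt[x] = cnt.get(x, 0) + 1
--     index = 0
--     for x in l:
--         rez.append("(" + str(x) + ", " + str(index) + ", " + str(cnt[x]) + ")")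
--         index += 1
--     return rez
-- ===== SOURCE B (Python) =====
-- def prelucrareTuplu(l):
--     # Group the positions of each value, then scatter the formatted strings
--     # into a preallocated result list (group-by + scatter instead of
--     # count-pass + sequential append).
--     pos = {}
--     for i, x in enumerate(l):
--         pos.setdefault(x, []).append(i)
--     rez = [""] * len(l)
--     for x, idxs in pos.items():
--         for i in idxs:
--             rez[i] = "(" + str(x) + ", " + str(i) + ", " + str(len(idxs)) + ")"
--     return rez
-- ===== Notes on version B (the rewrite author's own statement) =====
-- stated objective: alternative
-- what changed: Replaces A's frequency-dict pass plus sequential append-with-index-counter by a group-by-then-scatter algorithm: first group the positions of each value in a dict, then write each group's formatted strings directly into a preallocated result list at their positions.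
import Mathlib
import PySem

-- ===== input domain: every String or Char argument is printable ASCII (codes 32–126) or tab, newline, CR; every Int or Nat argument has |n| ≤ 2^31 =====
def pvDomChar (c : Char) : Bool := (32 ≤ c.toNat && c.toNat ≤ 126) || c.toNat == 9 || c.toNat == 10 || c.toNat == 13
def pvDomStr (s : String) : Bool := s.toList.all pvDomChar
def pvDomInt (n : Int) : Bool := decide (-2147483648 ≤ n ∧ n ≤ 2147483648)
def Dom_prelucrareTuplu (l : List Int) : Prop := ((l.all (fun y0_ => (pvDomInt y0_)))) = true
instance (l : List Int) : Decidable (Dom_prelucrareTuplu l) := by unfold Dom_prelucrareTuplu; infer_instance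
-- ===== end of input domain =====

-- B replaces A's frequency-dict pass + sequential append with a group-by-then-scatter
-- algorithm: group each value's positions in a dict, then write the formatted strings
-- into a preallocated result list at those positions (alternative algorithm, same cost).

-- ===== PORT A =====
-- cnt[x] = cnt.get(x, 0) + 1 → Dict.insert x (getD x 0 + 1); in the second loop x ∈ l so
-- cnt[x] never raises KeyError and is exactly cnt.getD x 0.
def prelucrareTuplu (l : List Int) : List String :=
  let cnt : PySem.Dict Int Int :=
    l.foldl (fun d x => d.insert x (d.getD x 0 + 1)) PySem.Dict.empty
  let st := l.foldl
    (fun (st : List String × Int) x =>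
      (st.1 ++ ["(" ++ PySem.Int.toStr x ++ ", " ++ PySem.Int.toStr st.2 ++ ", "
                ++ PySem.Int.toStr (cnt.getD x 0) ++ ")"], st.2 + 1))
    ([], 0)
  st.1

-- ===== PORT B =====
-- pos.setdefault(x, []).append(i) → Dict.modify x [] (· ++ [i]);
-- rez[i] = s → PySem.List.pySetD (the indices come from enumerate, so always in range).
def prelucrareTuplu_alt (l : List Int) : List String :=
  let pos : PySem.Dict Int (List Int) :=
    (PySem.List.enumerate l).foldl (fun d p => d.modify p.2 [] (· ++ [p.1])) PySem.Dict.empty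
  pos.items.foldl
    (fun rez xi =>
      xi.2.foldl (fun r i =>
        PySem.List.pySetD r i
          ("(" ++ PySem.Int.toStr xi.1 ++ ", " ++ PySem.Int.toStr i ++ ", "
            ++ PySem.Int.toStr ((xi.2.length : Int)) ++ ")")) rez)
    (List.replicate l.length "")

-- ===== PRECONDITION & SPEC =====
def Spec_prelucrareTuplu (l : List Int) (out : List String) : Prop := out = prelucrareTuplu_alt l
instance (l : List Int) (out : List String) : Decidable (Spec_prelucrareTuplu l out) := by unfold Spec_prelucrareTuplu; infer_instance

-- ===== CLAIM (what is proved, stated in full; the proofs are below) =====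
def Claim_equal_prelucrareTuplu : Prop := ∀ (l : List Int), Dom_prelucrareTuplu l → Spec_prelucrareTuplu l (prelucrareTuplu l)

-- ===== LEMMAS AND PROOFS =====

-- The formatted string for value x at position i (count of x in l as the third field).
def pvF (l : List Int) (x i : Int) : String :=
  "(" ++ PySem.Int.toStr x ++ ", " ++ PySem.Int.toStr i ++ ", "
    ++ PySem.Int.toStr ((l.count x : Nat) : Int) ++ ")"

-- Both programs compute this common normal form.
def pvTarget (l : List Int) : List String :=
  (PySem.List.enumerate l).map (fun p => pvF l p.2 p.1)

-- The positions of value x in l, in order, as Ints.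
def pvIdxsOf (l : List Int) (x : Int) : List Int :=
  ((PySem.List.enumerate l).filter (fun p => p.2 == x)).map (·.1)

-- B's per-group string: count field is the group's length.
def pvG (l : List Int) (x i : Int) : String :=
  "(" ++ PySem.Int.toStr x ++ ", " ++ PySem.Int.toStr i ++ ", "
    ++ PySem.Int.toStr (((pvIdxsOf l x).length : Nat) : Int) ++ ")"

-- A's second loop (append + index counter) is the map of g over enumerate.
theorem foldl_append_idx (g : Int → Int → String) :
    ∀ (l : List Int) (acc : List String) (i : Int),
      (l.foldl (fun (st : List String × Int) x => (st.1 ++ [g st.2 x], st.2 + 1)) (acc, i)).1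
        = acc ++ (PySem.List.enumerate l i).map (fun p => g p.1 p.2) := by
  intro l
  induction l with
  | nil => intro acc i; simp [PySem.List.enumerate_nil]
  | cons x xs ih =>
    intro acc i
    simp only [List.foldl_cons, PySem.List.enumerate_cons, List.map_cons]
    rw [ih]
    simp

theorem a_eq_target (l : List Int) : prelucrareTuplu l = pvTarget l := by
  unfold prelucrareTuplu pvTarget
  rw [foldl_append_idx
    (g := fun i x => "(" ++ PySem.Int.toStr x ++ ", " ++ PySem.Int.toStr i ++ ", "
        ++ PySem.Int.toStr
          ((l.foldl (fun d x => d.insert x (d.getD x 0 + 1)) PySem.Dict.empty).getD x 0) ++ ")")]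
  simp [PySem.Dict.getD_foldl_insert_add_one, PySem.Dict.getD_empty, pvF]

-- characterisation of the grouping dict: the entry at x holds the positions of x
theorem pos_getD (l : List Int) (x : Int) :
    ((PySem.List.enumerate l).foldl
        (fun d p => d.modify p.2 [] (· ++ [p.1])) PySem.Dict.empty).getD x []
      = pvIdxsOf l x := by
  rw [show (PySem.List.enumerate l).foldl
        (fun d p => d.modify p.2 [] (· ++ [p.1])) PySem.Dict.empty
      = ((PySem.List.enumerate l).map Prod.swap).foldl
        (fun d p => d.modify p.1 [] (· ++ [p.2])) PySem.Dict.empty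
    from (List.foldl_map (f := Prod.swap)
      (g := fun d (p : Int × Int) => d.modify p.1 [] (fun cur => cur ++ [p.2]))
      (l := PySem.List.enumerate l) (init := PySem.Dict.empty)).symm]
  rw [PySem.Dict.getD_foldl_modify_append]
  simp [pvIdxsOf, PySem.Dict.getD_empty, List.filter_map, List.map_map,
    Function.comp_def, Prod.swap]

theorem pos_items (l : List Int) :
    ((PySem.List.enumerate l).foldl
        (fun d p => d.modify p.2 [] (· ++ [p.1])) PySem.Dict.empty).items
      = (PySem.Set.ofList l).map (fun x => (x, pvIdxsOf l x)) := by
  have hnd := PySem.Dict.nodup_keys_foldl_modify_key (PySem.List.enumerate l)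
    (fun p => p.2) [] (fun _ p => (· ++ [p.1])) PySem.Dict.empty
    (by simp [PySem.Dict.keys_empty])
  have hkeys := PySem.Dict.keys_foldl_modify_key (PySem.List.enumerate l)
    (fun p => p.2) [] (fun _ p => (· ++ [p.1])) PySem.Dict.empty
  refine (PySem.Dict.items_eq_map_keys _ hnd []).trans ?_
  rw [hkeys, PySem.Dict.keys_empty, PySem.List.map_snd_enumerate,
    show PySem.Set.update ([] : List Int) l = PySem.Set.ofList l from by
      rw [PySem.Set.ofList_eq_foldl]; rfl]
  exact List.map_congr_left (fun x _ => congrArg (fun v => (x, v)) (pos_getD l x))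

theorem mem_idxsOf (l : List Int) (x i : Int) :
    i ∈ pvIdxsOf l x ↔ ∃ (k : Nat) (_ : k < l.length), i = (k : Int) ∧ l[k] = x := by
  simp only [pvIdxsOf, List.mem_map, List.mem_filter, PySem.List.mem_enumerate_iff]
  constructor
  · rintro ⟨p, ⟨⟨k, hk, rfl⟩, hx⟩, rfl⟩
    exact ⟨k, hk, by simp, by simpa using hx⟩
  · rintro ⟨k, hk, rfl, hx⟩
    exact ⟨((0 : Int) + k, l[k]), ⟨⟨k, hk, rfl⟩, by simpa using hx⟩, by simp⟩

theorem length_idxsOf (l : List Int) (x : Int) :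
    (pvIdxsOf l x).length = l.count x := by
  unfold pvIdxsOf
  rw [List.length_map, ← List.countP_eq_length_filter]
  conv_rhs => rw [← PySem.List.map_snd_enumerate l 0]
  rw [List.count_eq_countP, List.countP_map]
  rfl

-- scatter lemmas
theorem inner_length (g : Int → String) :
    ∀ (idxs : List Int) (r : List String),
      (idxs.foldl (fun r i => PySem.List.pySetD r i (g i)) r).length = r.length := by
  intro idxs
  induction idxs with
  | nil => intro r; rfl
  | cons i t ih => intro r; simp [List.foldl_cons, ih, PySem.List.length_pySetD]

theorem outer_length {β : Type} (step : List String → β → List String)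
    (hstep : ∀ r p, (step r p).length = r.length) :
    ∀ (gs : List β) (r : List String), (gs.foldl step r).length = r.length := by
  intro gs
  induction gs with
  | nil => intro r; rfl
  | cons p t ih => intro r; simp [List.foldl_cons, ih, hstep]

theorem inner_miss (g : Int → String) (j : Nat) :
    ∀ (idxs : List Int) (r : List String),
      (∀ i ∈ idxs, ∃ k : Nat, i = (k : Int) ∧ k ≠ j) →
      (idxs.foldl (fun r i => PySem.List.pySetD r i (g i)) r)[j]? = r[j]? := by
  intro idxs
  induction idxs with
  | nil => intro r _; rfl
  | cons i t ih =>
    intro r h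
    obtain ⟨k, rfl, hk⟩ := h i (List.mem_cons_self ..)
    simp only [List.foldl_cons, PySem.List.pySetD_natCast]
    rw [ih _ (fun i hi => h i (List.mem_cons_of_mem _ hi)), List.getElem?_set_ne hk]

theorem inner_hit (g : Int → String) (j : Nat) :
    ∀ (idxs : List Int) (r : List String),
      (∀ i ∈ idxs, ∃ k : Nat, i = (k : Int)) →
      (j : Int) ∈ idxs → j < r.length →
      (idxs.foldl (fun r i => PySem.List.pySetD r i (g i)) r)[j]? = some (g (j : Int)) := by
  intro idxs
  induction idxs with
  | nil => intro r _ hm _; cases hm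
  | cons i t ih =>
    intro r hnat hmem hlen
    obtain ⟨k, rfl⟩ := hnat i (List.mem_cons_self ..)
    simp only [List.foldl_cons, PySem.List.pySetD_natCast]
    by_cases hjt : ((j : Nat) : Int) ∈ t
    · exact ih _ (fun i hi => hnat i (List.mem_cons_of_mem _ hi)) hjt (by simpa using hlen)
    · have hkj : k = j := by
        rcases List.mem_cons.mp hmem with h | h
        · exact_mod_cast h.symm
        · exact absurd h hjt
      subst hkj
      have hmiss : ∀ i ∈ t, ∃ k' : Nat, i = (k' : Int) ∧ k' ≠ k := by
        intro i hi
        obtain ⟨k', rfl⟩ := hnat i (List.mem_cons_of_mem _ hi)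
        exact ⟨k', rfl, fun he => hjt (he ▸ hi)⟩
      rw [inner_miss g k t _ hmiss]
      exact List.getElem?_set_self (by simpa using hlen)

theorem outer_miss (l : List Int) (G : Int → Int → String) (j : Nat) :
    ∀ (vs : List Int) (r : List String),
      (∀ y ∈ vs, ∀ i ∈ pvIdxsOf l y, ∃ k : Nat, i = (k : Int) ∧ k ≠ j) →
      (vs.foldl (fun rez x =>
          (pvIdxsOf l x).foldl (fun rr i => PySem.List.pySetD rr i (G x i)) rez) r)[j]?
        = r[j]? := by
  intro vs
  induction vs with
  | nil => intro r _; rfl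
  | cons x t ih =>
    intro r h
    simp only [List.foldl_cons]
    rw [ih _ (fun y hy => h y (List.mem_cons_of_mem _ hy)),
      inner_miss (G x) j _ _ (h x (List.mem_cons_self ..))]

theorem outer_hit (l : List Int) (G : Int → Int → String) (j : Nat) (hj : j < l.length) :
    ∀ (vs : List Int) (r : List String), vs.Nodup → r.length = l.length → l[j] ∈ vs →
      (vs.foldl (fun rez x =>
          (pvIdxsOf l x).foldl (fun rr i => PySem.List.pySetD rr i (G x i)) rez) r)[j]?
        = some (G l[j] (j : Int)) := by
  intro vs
  induction vs with
  | nil => intro r _ _ hm; cases hm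
  | cons x t ih =>
    intro r hnd hlen hm
    simp only [List.foldl_cons]
    have hnat : ∀ i ∈ pvIdxsOf l x, ∃ k : Nat, i = (k : Int) := by
      intro i hi
      obtain ⟨k, hk, rfl, _⟩ := (mem_idxsOf l x i).mp hi
      exact ⟨k, rfl⟩
    by_cases hx : l[j] = x
    · have hmemj : (j : Int) ∈ pvIdxsOf l x := (mem_idxsOf l x _).mpr ⟨j, hj, rfl, hx⟩
      have hmiss : ∀ y ∈ t, ∀ i ∈ pvIdxsOf l y, ∃ k : Nat, i = (k : Int) ∧ k ≠ j := by
        intro y hy i hi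
        obtain ⟨k, hk, rfl, hky⟩ := (mem_idxsOf l y i).mp hi
        refine ⟨k, rfl, fun he => ?_⟩
        subst he
        have hyx : y = x := by rw [← hky, hx]
        exact (List.nodup_cons.mp hnd).1 (hyx ▸ hy)
      rw [outer_miss l G j t _ hmiss,
        inner_hit (G x) j _ r hnat hmemj (by rw [hlen]; exact hj), hx]
    · have hm' : l[j] ∈ t := by
        rcases List.mem_cons.mp hm with h | h
        · exact absurd h hx
        · exact h
      exact ih _ (List.nodup_cons.mp hnd).2
        (by rw [inner_length]; exact hlen) hm'

-- B unfolded to the group-by-then-scatter normal form over the distinct values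
theorem b_unfolded (l : List Int) :
    prelucrareTuplu_alt l
      = (PySem.Set.ofList l).foldl (fun rez x =>
          (pvIdxsOf l x).foldl (fun rr i => PySem.List.pySetD rr i (pvG l x i)) rez)
        (List.replicate l.length "") := by
  unfold prelucrareTuplu_alt
  show (((PySem.List.enumerate l).foldl
        (fun d p => d.modify p.2 [] (· ++ [p.1])) PySem.Dict.empty).items).foldl
      (fun rez xi =>
        xi.2.foldl (fun r i =>
          PySem.List.pySetD r i
            ("(" ++ PySem.Int.toStr xi.1 ++ ", " ++ PySem.Int.toStr i ++ ", "
              ++ PySem.Int.toStr ((xi.2.length : Int)) ++ ")")) rez)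
      (List.replicate l.length "") = _
  rw [pos_items, List.foldl_map]
  rfl

theorem b_eq_target (l : List Int) : prelucrareTuplu_alt l = pvTarget l := by
  rw [b_unfolded]
  apply List.ext_getElem?
  intro j
  by_cases hj : j < l.length
  · rw [outer_hit l (pvG l) j hj _ _ (PySem.Set.nodup_ofList l) (by simp)
      ((PySem.Set.mem_ofList l _).mpr (List.getElem_mem hj))]
    simp [pvTarget, List.getElem?_map, PySem.List.getElem?_enumerate,
      List.getElem?_eq_getElem hj, pvG, pvF, length_idxsOf]
  · refine (List.getElem?_eq_none ?_).trans (List.getElem?_eq_none ?_).symm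
    · rw [outer_length _ (fun r x => inner_length (pvG l x) (pvIdxsOf l x) r)]
      simp; omega
    · simp [pvTarget, PySem.List.length_enumerate]; omega

-- ===== VERDICT (by name: the statement is the Claim_ definition above) =====
theorem prelucrareTuplu_spec : Claim_equal_prelucrareTuplu := by
  intro l _
  show prelucrareTuplu l = prelucrareTuplu_alt l
  rw [a_eq_target, b_eq_target]
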